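-- pv_equiv track=rewrite | github.com/garvit000/andromeda | app.py | _detect_operation_label
-- ===== SOURCE A (Python) =====
-- def _detect_operation_label(expr: str) -> str:
--     expr_clean = expr.strip()
--     if "+" in expr_clean and not any(c in expr_clean for c in "-*/^%"):
--         return "sum"
--     if "-" in expr_clean and not any(c in expr_clean for c in "+*/^%"):
--         return "difference"
--     if "*" in expr_clean and not any(c in expr_clean for c in "+-/^%"):
--         return "product"
--     if "/" in expr_clean and not any(c in expr_clean for c in "+-*^%"):
--         return "quotient"
--     return "result"
-- ===== SOURCE B (Python) =====
-- _OP_TABLE = {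
--     frozenset('+'): 'sum',
--     frozenset('-'): 'difference',
--     frozenset('*'): 'product',
--     frozenset('/'): 'quotient',
-- }
--
--
-- def _detect_operation_label(expr: str) -> str:
--     ops = frozenset(c for c in expr.strip() if c in '+-*/^%')
--     return _OP_TABLE.get(ops, 'result')
-- ===== Notes on version B (the rewrite author's own statement) =====
-- stated objective: simpler
-- what changed: Replaces the four branch conditions that each rescan the string (one membership test plus an any() over five other operators) by a single pass collecting the set of operator characters present, followed by one table lookup keyed by that set.
import Mathlib
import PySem

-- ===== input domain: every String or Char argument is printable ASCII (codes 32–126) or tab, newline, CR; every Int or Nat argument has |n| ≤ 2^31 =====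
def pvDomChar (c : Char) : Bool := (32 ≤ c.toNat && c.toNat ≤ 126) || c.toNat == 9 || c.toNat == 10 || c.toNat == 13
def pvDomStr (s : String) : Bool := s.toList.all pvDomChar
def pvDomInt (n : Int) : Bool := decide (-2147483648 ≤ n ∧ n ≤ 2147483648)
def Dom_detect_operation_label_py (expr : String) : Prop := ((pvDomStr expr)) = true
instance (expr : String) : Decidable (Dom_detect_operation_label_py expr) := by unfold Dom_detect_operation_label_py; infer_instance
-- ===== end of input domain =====

-- B replaces A's four repeated membership scans by one pass building the set of
-- operator characters present plus a single table lookup keyed by that set (simpler).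


-- ===== PORT A =====
def detect_operation_label_py (expr : String) : String :=
  let ec := PySem.Str.strip expr
  if PySem.Str.isIn "+" ec
      && !((("-*/^%" : String).toList).any (fun c => PySem.Str.isIn (String.ofList [c]) ec)) then
    "sum"
  else if PySem.Str.isIn "-" ec
      && !((("+*/^%" : String).toList).any (fun c => PySem.Str.isIn (String.ofList [c]) ec)) then
    "difference"
  else if PySem.Str.isIn "*" ec
      && !((("+-/^%" : String).toList).any (fun c => PySem.Str.isIn (String.ofList [c]) ec)) then
    "product"
  else if PySem.Str.isIn "/" ec
      && !((("+-*^%" : String).toList).any (fun c => PySem.Str.isIn (String.ofList [c]) ec)) then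
    "quotient"
  else
    "result"

-- ===== PORT B =====
-- _OP_TABLE: frozenset keys as lists of their elements; dict.get scans by set equality
def pvOpTable : List (List Char × String) :=
  [(['+'], "sum"), (['-'], "difference"), (['*'], "product"), (['/'], "quotient")]

-- dict.get on the 4-entry frozenset-keyed table: first key equal AS A SET wins, else default
def pvTableGet : List (List Char × String) → PySem.Set Char → String → String
  | [], _, dflt => dflt
  | (k, v) :: rest, s, dflt =>
      if PySem.Set.equal (PySem.Set.ofList k) s then v else pvTableGet rest s dflt

def detect_operation_label_py_alt (expr : String) : String :=
  -- frozenset(c for c in expr.strip() if c in '+-*/^%'); 'c in str' for a single char = membership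
  let ops : PySem.Set Char :=
    PySem.Set.ofList (((PySem.Str.strip expr).toList).filter
      (fun c => (("+-*/^%" : String).toList).contains c))
  pvTableGet pvOpTable ops "result"

-- ===== PRECONDITION & SPEC =====
def Spec_detect_operation_label_py (expr : String) (out : String) : Prop := out = detect_operation_label_py_alt expr
instance (expr : String) (out : String) : Decidable (Spec_detect_operation_label_py expr out) := by unfold Spec_detect_operation_label_py; infer_instance

-- ===== CLAIM (what is proved, stated in full; the proofs are below) =====
def Claim_equal_detect_operation_label_py : Prop := ∀ (expr : String), Dom_detect_operation_label_py expr → Spec_detect_operation_label_py expr (detect_operation_label_py expr)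

-- ===== LEMMAS AND PROOFS =====

-- 'sub in s' for a one-character sub is element membership
theorem chars_isIn_single (c : Char) (l : List Char) :
    PySem.Chars.isIn [c] l = l.contains c := by
  by_cases h : c ∈ l
  · have : [c] <:+: l := by
      obtain ⟨s, t, rfl⟩ := List.append_of_mem h
      exact ⟨s, t, by simp⟩
    simp [(PySem.Chars.isIn_iff_infix _ _).mpr this, h]
  · have : PySem.Chars.isIn [c] l = false :=
      (PySem.Chars.isIn_eq_false_iff _ _).mpr (fun hin => h (hin.mem (List.mem_singleton_self c)))
    simp [this, h]

-- A's branch condition for operator c (no other operator from `others` present)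
-- coincides with B's table test "the collected operator set equals {c}".
theorem cond_eq (l : List Char) (c : Char) (others : List Char) (p : Char → Bool)
    (hc : p c = true) (hperm : ∀ x, p x = true ↔ (x = c ∨ x ∈ others)) (hco : c ∉ others) :
    (l.contains c && !(others.any (fun d => l.contains d)))
      = PySem.Set.equal (PySem.Set.ofList [c]) (PySem.Set.ofList (l.filter p)) := by
  rw [Bool.eq_iff_iff]
  rw [PySem.Set.equal_iff]
  simp only [Bool.and_eq_true, Bool.not_eq_eq_eq_not, Bool.not_true, List.any_eq_false,
    List.contains_eq_mem, decide_eq_true_eq,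
    PySem.Set.mem_ofList, List.mem_filter, List.mem_singleton]
  constructor
  · rintro ⟨hcl, hothers⟩ x
    constructor
    · rintro rfl; exact ⟨hcl, hc⟩
    · rintro ⟨hxl, hpx⟩
      rcases (hperm x).mp hpx with rfl | hxo
      · rfl
      · exact absurd hxl (hothers x hxo)
  · intro h
    refine ⟨((h c).mp rfl).1, fun d hd hdl => ?_⟩
    have hpd : p d = true := (hperm d).mpr (Or.inr hd)
    exact hco (((h d).mpr ⟨hdl, hpd⟩) ▸ hd)

-- string-literal .toList values, pre-evaluated for the rewrites below
theorem pvToList_ops : ("+-*/^%" : String).toList = ['+', '-', '*', '/', '^', '%'] := by decide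
theorem pvToList_1 : ("-*/^%" : String).toList = ['-', '*', '/', '^', '%'] := by decide
theorem pvToList_2 : ("+*/^%" : String).toList = ['+', '*', '/', '^', '%'] := by decide
theorem pvToList_3 : ("+-/^%" : String).toList = ['+', '-', '/', '^', '%'] := by decide
theorem pvToList_4 : ("+-*^%" : String).toList = ['+', '-', '*', '^', '%'] := by decide
theorem pvToList_p : ("+" : String).toList = ['+'] := by decide
theorem pvToList_m : ("-" : String).toList = ['-'] := by decide
theorem pvToList_t : ("*" : String).toList = ['*'] := by decide
theorem pvToList_d : ("/" : String).toList = ['/'] := by decide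

-- ===== VERDICT (by name: the statement is the Claim_ definition above) =====
theorem detect_operation_label_py_spec : Claim_equal_detect_operation_label_py := by
  intro expr _
  unfold Spec_detect_operation_label_py detect_operation_label_py detect_operation_label_py_alt
  simp only [pvTableGet, pvOpTable, PySem.Str.isIn_eq, pvToList_ops, pvToList_1, pvToList_2,
    pvToList_3, pvToList_4, pvToList_p, pvToList_m, pvToList_t, pvToList_d,
    String.toList_ofList, chars_isIn_single]
  rw [cond_eq _ '+' ['-', '*', '/', '^', '%'] (fun c => (['+', '-', '*', '/', '^', '%'] : List Char).contains c) (by decide)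
        (by intro x; simp [List.contains_eq_mem]) (by decide),
      cond_eq _ '-' ['+', '*', '/', '^', '%'] (fun c => (['+', '-', '*', '/', '^', '%'] : List Char).contains c) (by decide)
        (by intro x; simp [List.contains_eq_mem]; tauto) (by decide),
      cond_eq _ '*' ['+', '-', '/', '^', '%'] (fun c => (['+', '-', '*', '/', '^', '%'] : List Char).contains c) (by decide)
        (by intro x; simp [List.contains_eq_mem]; tauto) (by decide),
      cond_eq _ '/' ['+', '-', '*', '^', '%'] (fun c => (['+', '-', '*', '/', '^', '%'] : List Char).contains c) (by decide)
        (by intro x; simp [List.contains_eq_mem]; tauto) (by decide)]
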